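-- pv_equiv track=rewrite | github.com/noaa-oar-arl/utilhysplit | utilhysplit/evaluation/polygon_plots.py | sort_labels
-- ===== SOURCE A (Python) =====
-- def sort_labels(handles, labels):
--     lset = list(set(labels))
--     lset.sort()
--     hset = []
--     zzz = list(zip(labels, handles))
--     for val in lset:
--         for zval in zzz:
--             if zval[0] == val:
--                 hset.append(zval[1])
--                 break
--     return hset, lset
-- ===== SOURCE B (Python) =====
-- def sort_labels(handles, labels):
--     first = {}
--     for lab, h in zip(labels, handles):
--         if lab not in first:
--             first[lab] = h
--     lset = sorted(set(labels))
--     hset = [first[lab] for lab in lset if lab in first]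
--     return hset, lset
-- ===== Notes on version B (the rewrite author's own statement) =====
-- stated objective: faster
-- what changed: Replaces the per-unique-label rescans of the zipped list by a single first-wins dict built in one pass, then looks each sorted unique label up in the dict.
import Mathlib
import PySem

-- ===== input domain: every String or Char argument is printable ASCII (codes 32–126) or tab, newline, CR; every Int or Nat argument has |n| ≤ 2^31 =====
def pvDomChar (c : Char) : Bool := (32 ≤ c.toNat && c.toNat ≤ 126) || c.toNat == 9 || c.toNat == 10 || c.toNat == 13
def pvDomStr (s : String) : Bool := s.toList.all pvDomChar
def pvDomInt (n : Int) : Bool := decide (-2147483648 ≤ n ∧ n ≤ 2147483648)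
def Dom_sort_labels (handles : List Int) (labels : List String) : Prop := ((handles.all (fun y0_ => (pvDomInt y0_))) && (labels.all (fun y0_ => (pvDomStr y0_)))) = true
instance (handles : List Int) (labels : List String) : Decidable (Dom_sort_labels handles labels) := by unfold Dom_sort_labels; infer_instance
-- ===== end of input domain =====

-- B replaces A's per-unique-label rescans of the zipped list by a one-pass first-wins dict plus sorted-key lookups (measured faster).


-- ===== PORT A =====
-- inner loop of A: scan zzz, append first matching handle (break)
def pvInnerA (zzz : List (String × Int)) (val : String) (hset : List Int) : List Int :=
  match zzz with
  | [] => hset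
  | z :: rest => if z.1 == val then hset ++ [z.2] else pvInnerA rest val hset

def sort_labels (handles : List Int) (labels : List String) : List Int × List String :=
  let lset := PySem.List.sorted (PySem.Set.ofList labels) (fun x => x) false
  let zzz := labels.zip handles
  let hset := lset.foldl (fun hset val => pvInnerA zzz val hset) []
  (hset, lset)

-- ===== PORT B =====
-- B: one-pass first-wins dict label -> handle, then sorted unique labels looked up
def sort_labels_alt (handles : List Int) (labels : List String) : List Int × List String :=
  let first := (labels.zip handles).foldl
    (fun d p => if d.contains p.1 then d else d.insert p.1 p.2) PySem.Dict.empty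
  let lset := PySem.List.sorted (PySem.Set.ofList labels) (fun x => x) false
  let hset := lset.filterMap (fun lab => first.get? lab)
  (hset, lset)

-- ===== PRECONDITION & SPEC =====
def Spec_sort_labels (handles : List Int) (labels : List String) (out : List Int × List String) : Prop := out = sort_labels_alt handles labels
instance (handles : List Int) (labels : List String) (out : List Int × List String) : Decidable (Spec_sort_labels handles labels out) := by unfold Spec_sort_labels; infer_instance

-- ===== CLAIM (what is proved, stated in full; the proofs are below) =====
def Claim_equal_sort_labels : Prop := ∀ (handles : List Int) (labels : List String), Dom_sort_labels handles labels → Spec_sort_labels handles labels (sort_labels handles labels)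

-- ===== LEMMAS AND PROOFS =====

-- A's inner scan appends the first matching handle (if any) to the accumulator
theorem pvInnerA_eq (zzz : List (String × Int)) (val : String) (hset : List Int) :
    pvInnerA zzz val hset = hset ++ ((zzz.find? (fun p => p.1 == val)).map (·.2)).toList := by
  induction zzz generalizing hset with
  | nil => simp [pvInnerA]
  | cons z rest ih =>
    by_cases h : z.1 == val <;> simp [pvInnerA, List.find?, h, ih]

-- B's first-wins dict lookup equals the first match in the list
theorem pvDict_get_eq (zzz : List (String × Int)) (d : PySem.Dict String Int) (val : String) :
    ((zzz.foldl (fun d p => if d.contains p.1 then d else d.insert p.1 p.2) d).get? val)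
      = ((d.get? val).or ((zzz.find? (fun p => p.1 == val)).map (·.2))) := by
  induction zzz generalizing d with
  | nil => simp
  | cons z rest ih =>
    simp only [List.foldl_cons]
    by_cases h : z.1 == val
    · obtain rfl : z.1 = val := eq_of_beq h
      by_cases hc : d.contains z.1
      · rw [if_pos hc, ih]
        have hs := hc; rw [PySem.Dict.contains_eq_isSome_get?] at hs
        obtain ⟨v, hv⟩ := Option.isSome_iff_exists.mp hs
        simp [List.find?_cons, h, hv]
      · rw [if_neg hc, ih]
        have hn : d.get? z.1 = none := by
          rw [PySem.Dict.contains_eq_isSome_get?] at hc; simpa using hc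
        simp [List.find?_cons, h, hn, PySem.Dict.get?_insert_self]
    · have hne : val ≠ z.1 := fun e => (by simp [e] at h)
      by_cases hc : d.contains z.1
      · rw [if_pos hc, ih]; simp [List.find?_cons, h]
      · rw [if_neg hc, ih, PySem.Dict.get?_insert_of_ne _ _ hne]
        simp [List.find?_cons, h]

-- folding the inner scan over a list of labels = filterMap of the first matches
theorem pvFold_eq (zzz : List (String × Int)) (ls : List String) (acc : List Int) :
    ls.foldl (fun hset val => pvInnerA zzz val hset) acc
      = acc ++ ls.filterMap (fun lab => (zzz.find? (fun p => p.1 == lab)).map (·.2)) := by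
  induction ls generalizing acc with
  | nil => simp
  | cons l rest ih =>
    rw [List.foldl_cons, pvInnerA_eq, ih, List.filterMap_cons]
    cases h : (zzz.find? (fun p => p.1 == l)).map (·.2) with
    | none => simp only [Option.toList, List.append_nil]
    | some v => simp only [Option.toList, List.append_assoc, List.singleton_append]

-- ===== VERDICT (by name: the statement is the Claim_ definition above) =====
theorem sort_labels_spec : Claim_equal_sort_labels := by
  intro handles labels _
  unfold Spec_sort_labels sort_labels sort_labels_alt
  simp only [pvFold_eq, List.nil_append]
  congr 1
  apply List.filterMap_congr
  intro lab _
  rw [pvDict_get_eq]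
  simp
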